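-- pv_equiv track=rewrite | github.com/pazamaccom/btc-trading-simulator | btc_trader_v15/regime_detector_v3.py | _smooth_regimes
-- ===== SOURCE A (Python) =====
-- from typing import Dict, List, Optional, Tuple
--
-- def _smooth_regimes(
--     regimes: List[Optional[str]], min_bars: int
-- ) -> List[Optional[str]]:
--     """Remove short-lived regime periods."""
--     if not regimes or min_bars <= 1:
--         return regimes
--
--     result = list(regimes)
--     n = len(result)
--
--     # Pass 1: Majority-vote smoothing
--     half_win = min_bars
--     smoothed = list(result)
--     for i in range(n):
--         if result[i] is None:
--             continue
--         lo = max(0, i - half_win)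
--         hi = min(n, i + half_win + 1)
--         counts: Dict[str, int] = {}
--         for j in range(lo, hi):
--             r = result[j]
--             if r is not None:
--                 counts[r] = counts.get(r, 0) + 1
--         if counts:
--             smoothed[i] = max(counts, key=counts.get)
--
--     result = smoothed
--
--     # Pass 2: Iterative absorption
--     max_passes = 50
--     for _pass in range(max_passes):
--         runs: List[Tuple[int, int, Optional[str]]] = []
--         run_start = 0
--         for i in range(1, n):
--             if result[i] != result[run_start]:
--                 runs.append((run_start, i - 1, result[run_start]))
--                 run_start = i
--         runs.append((run_start, n - 1, result[run_start]))
--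
--         changed = False
--         for idx_r, (start, end, regime) in enumerate(runs):
--             if regime is None:
--                 continue
--             length = end - start + 1
--             if length < min_bars:
--                 prev_regime = None
--                 prev_len = 0
--                 for j in range(idx_r - 1, -1, -1):
--                     if runs[j][2] is not None:
--                         prev_regime = runs[j][2]
--                         prev_len = runs[j][1] - runs[j][0] + 1
--                         break
--                 next_regime = None
--                 next_len = 0
--                 for j in range(idx_r + 1, len(runs)):
--                     if runs[j][2] is not None:
--                         next_regime = runs[j][2]
--                         next_len = runs[j][1] - runs[j][0] + 1
--                         break
--
--                 if prev_regime is not None and next_regime is not None: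
--                     replacement = prev_regime if prev_len >= next_len else next_regime
--                 elif prev_regime is not None:
--                     replacement = prev_regime
--                 elif next_regime is not None:
--                     replacement = next_regime
--                 else:
--                     continue
--
--                 for k in range(start, end + 1):
--                     result[k] = replacement
--                 changed = True
--                 break
--
--         if not changed:
--             break
--
--     return result
-- ===== SOURCE B (Python) =====
-- from typing import List, Optional, Tuple
--
--
-- def _vote(window: List[Optional[str]]) -> Optional[str]:
--     """Majority label of a window: first-seen label with the highest count."""
--     ws = [r for r in window if r is not None]
--     return max(list(dict.fromkeys(ws)), key=ws.count)
--
--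
-- def _runs_of(result: List[Optional[str]]) -> List[Tuple[int, int, Optional[str]]]:
--     """Run-length segmentation as (start, end, label), by a run-advancing pointer."""
--     runs = []
--     i, n = 0, len(result)
--     while i < n:
--         j = i + 1
--         while j < n and result[j] == result[i]:
--             j += 1
--         runs.append((i, j - 1, result[i]))
--         i = j
--     return runs
--
--
-- def _absorb_step(runs, min_bars):
--     """First short non-None run and its replacement, found in one forward scan
--     that carries the nearest previous non-None run along."""
--     before = None  # (label, length) of the nearest previous non-None run
--     for idx in range(len(runs)):
--         start, end, regime = runs[idx]
--         length = end - start + 1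
--         if regime is not None and length < min_bars:
--             after = next(
--                 ((r, e - s + 1) for s, e, r in runs[idx + 1:] if r is not None), None
--             )
--             if before is not None and after is not None:
--                 repl = before[0] if before[1] >= after[1] else after[0]
--             elif before is not None:
--                 repl = before[0]
--             elif after is not None:
--                 repl = after[0]
--             else:
--                 repl = None
--             if repl is not None:
--                 return start, end, repl
--         if regime is not None:
--             before = (regime, end - start + 1)
--     return None
--
--
-- def _absorb(result, min_bars, fuel=50):
--     """Iterative absorption, written as recursion with the same 50-pass cap."""
--     if fuel == 0:
--         return result
--     hit = _absorb_step(_runs_of(result), min_bars)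
--     if hit is None:
--         return result
--     start, end, repl = hit
--     result = result[:start] + [repl] * (end - start + 1) + result[end + 1:]
--     return _absorb(result, min_bars, fuel - 1)
--
--
-- def _smooth_regimes(
--     regimes: List[Optional[str]], min_bars: int
-- ) -> List[Optional[str]]:
--     """Remove short-lived regime periods (window-slice vote + run-list absorption)."""
--     if not regimes or min_bars <= 1:
--         return regimes
--     smoothed = [
--         r if r is None else _vote(regimes[max(0, i - min_bars): i + min_bars + 1])
--         for i, r in enumerate(regimes)
--     ]
--     return _absorb(smoothed, min_bars)
-- ===== Notes on version B (the rewrite author's own statement) =====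
-- stated objective: alternative
-- what changed: Pass 1's per-index dict counting + max(counts, key=get) is replaced by a comprehension that votes on a window slice via first-seen dedup and list.count; pass 2's index-fold run building, backward neighbour rescans and per-index write loop are replaced by a run-advancing pointer segmentation, a single forward scan carrying the nearest previous non-None run, and a slice splice, with the 50-pass loop written as recursion.
import Mathlib
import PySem

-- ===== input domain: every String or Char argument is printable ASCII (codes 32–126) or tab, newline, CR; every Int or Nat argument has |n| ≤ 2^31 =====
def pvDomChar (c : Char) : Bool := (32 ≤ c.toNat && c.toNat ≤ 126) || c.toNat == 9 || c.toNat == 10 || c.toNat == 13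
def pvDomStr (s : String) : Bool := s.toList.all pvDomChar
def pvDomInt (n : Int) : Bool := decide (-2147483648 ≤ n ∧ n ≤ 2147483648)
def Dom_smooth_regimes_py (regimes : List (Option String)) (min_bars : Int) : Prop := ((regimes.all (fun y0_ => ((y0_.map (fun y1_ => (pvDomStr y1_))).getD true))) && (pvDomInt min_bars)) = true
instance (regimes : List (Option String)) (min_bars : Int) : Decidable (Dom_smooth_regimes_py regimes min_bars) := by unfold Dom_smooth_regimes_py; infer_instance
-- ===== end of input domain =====

-- B replaces A's per-index dict-counting window vote by a slice/dedup/count comprehension and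
-- A's index-fold run building and backward neighbour rescans by a run-advancing pointer plus a
-- carried nearest-previous-run scan (objective: alternative; same results, different structure).


-- ===== PORT A =====

-- 'counts = {}' built over 'for j in range(lo, hi)'
def winCounts (res : List (Option String)) (lo hi : Nat) : PySem.Dict String Int :=
  (List.range' lo (hi - lo)).foldl
    (fun d j => match res.getD j none with
      | none => d
      | some r => d.insert r (d.getD r 0 + 1))
    PySem.Dict.empty

-- 'max(counts, key=counts.get)' (none iff counts is empty, i.e. the 'if counts:' guard)
def pyMaxKey? (counts : PySem.Dict String Int) : Option String :=
  PySem.List.max? counts.keys (fun k => counts.getD k 0)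

-- the window vote at index i: lo = max(0, i - half_win) is Nat subtraction, hi = min(n, i + half_win + 1)
def voteA (res : List (Option String)) (w i : Nat) : Option String :=
  pyMaxKey? (winCounts res (i - w) (min res.length (i + w + 1)))

-- Pass 1 of Source A: 'for i in range(n)', recounting the window and writing into 'smoothed'
def pass1A (res : List (Option String)) (w : Nat) : List (Option String) :=
  (List.range res.length).foldl
    (fun sm i => match res.getD i none with
      | none => sm
      | some _ =>
        match voteA res w i with
        | none => sm
        | some k => sm.set i (some k))
    res

-- runs = [(start, end, label)] built by the index scan 'for i in range(1, n)'
def buildRuns (res : List (Option String)) (n : Nat) : List (Nat × Nat × Option String) :=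
  let st := (List.range' 1 (n - 1)).foldl
    (fun (st : List (Nat × Nat × Option String) × Nat) i =>
      if res.getD i none ≠ res.getD st.2 none then
        (st.1 ++ [(st.2, i - 1, res.getD st.2 none)], i)
      else st)
    ([], 0)
  st.1 ++ [(st.2, n - 1, res.getD st.2 none)]

-- the nearest non-None neighbour scans ('for j in range(idx-1,-1,-1)' is the scan of the
-- reversed prefix, 'for j in range(idx+1, len(runs))' the scan of the suffix)
def findNbr (l : List (Nat × Nat × Option String)) : Option (String × Nat) :=
  l.findSome? (fun t => t.2.2.map (fun r => (r, t.2.1 - t.1 + 1)))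

-- the 'for idx_r, (start, end, regime) in enumerate(runs)' scan with its break:
-- prevRev is the already-passed prefix, reversed
def absorbGo (minb : Int) : List (Nat × Nat × Option String) → List (Nat × Nat × Option String) →
    Option (Nat × Nat × String)
  | _, [] => none
  | prevRev, t :: rest =>
    match t.2.2 with
    | none => absorbGo minb (t :: prevRev) rest
    | some _ =>
      if ((t.2.1 - t.1 + 1 : Nat) : Int) < minb then
        match findNbr prevRev, findNbr rest with
        | some (pr, pl), some (nr, nl) => some (t.1, t.2.1, if nl ≤ pl then pr else nr)
        | some (pr, _), none => some (t.1, t.2.1, pr)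
        | none, some (nr, _) => some (t.1, t.2.1, nr)
        | none, none => absorbGo minb (t :: prevRev) rest
      else absorbGo minb (t :: prevRev) rest

-- 'for k in range(start, end+1): result[k] = replacement'
def setRange (res : List (Option String)) (s e : Nat) (v : Option String) : List (Option String) :=
  (List.range' s (e + 1 - s)).foldl (fun r k => r.set k v) res

-- 'for _pass in range(max_passes)' with its two breaks
def pass2 (minb : Int) (n : Nat) : Nat → List (Option String) → List (Option String)
  | 0, res => res
  | fuel + 1, res =>
    match absorbGo minb [] (buildRuns res n) with
    | none => res
    | some (s, e, repl) => pass2 minb n fuel (setRange res s e (some repl))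

def smooth_regimes_py (regimes : List (Option String)) (min_bars : Int) : List (Option String) :=
  if regimes = [] ∨ min_bars ≤ 1 then regimes
  else pass2 min_bars regimes.length 50 (pass1A regimes min_bars.toNat)

-- ===== PORT B =====

-- '_vote': the non-None entries of the window, their first-seen dedup, max by count
def voteB (window : List (Option String)) : Option String :=
  PySem.List.max? (PySem.List.dedup (window.filterMap id))
    (fun r => ((window.filterMap id).count r : Int))

-- the pass-1 comprehension: '[r if r is None else _vote(regimes[max(0,i-mb):i+mb+1]) …]'
def pass1B (res : List (Option String)) (mb : Int) : List (Option String) :=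
  (PySem.List.enumerate res 0).map (fun p =>
    match p.2 with
    | none => none
    | some _ => voteB (PySem.List.slice res (some (max 0 (p.1 - mb))) (some (p.1 + mb + 1))))

-- '_runs_of': run-advancing pointer (the inner 'while' is the takeWhile)
def runsGo : Nat → List (Option String) → List (Nat × Nat × Option String)
  | _, [] => []
  | i, r :: rest =>
    let k := (rest.takeWhile (fun x => x == r)).length
    (i, i + k, r) :: runsGo (i + k + 1) (rest.drop k)
termination_by _ l => l.length
decreasing_by simp

-- 'next(((r, e - s + 1) for s, e, r in runs[idx+1:] if r is not None), None)'
def nbrAfter (rest : List (Nat × Nat × Option String)) : Option (String × Nat) :=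
  rest.findSome? (fun q => q.2.2.map (fun x => (x, q.2.1 - q.1 + 1)))

-- the 'if before … / elif … / else' replacement chain of '_absorb_step'
def pickRepl (before after : Option (String × Nat)) : Option String :=
  match before, after with
  | some (pr, pl), some (nr, nl) => some (if nl ≤ pl then pr else nr)
  | some (pr, _), none => some pr
  | none, some (nr, _) => some nr
  | none, none => none

-- '_absorb_step': one forward scan carrying 'before', the nearest previous non-None run
def scanB (minb : Int) : Option (String × Nat) → List (Nat × Nat × Option String) →
    Option (Nat × Nat × String)
  | _, [] => none
  | before, (s, e, r) :: rest =>
    match r with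
    | none => scanB minb before rest
    | some rr =>
      if ((e - s + 1 : Nat) : Int) < minb then
        match pickRepl before (nbrAfter rest) with
        | some repl => some (s, e, repl)
        | none => scanB minb (some (rr, e - s + 1)) rest
      else scanB minb (some (rr, e - s + 1)) rest

-- '_absorb': recursion with the 50-pass cap; the write-back is the slice splice
def absorbB (minb : Int) : Nat → List (Option String) → List (Option String)
  | 0, res => res
  | fuel + 1, res =>
    match scanB minb none (runsGo 0 res) with
    | none => res
    | some (s, e, repl) =>
      absorbB minb fuel (res.take s ++ List.replicate (e + 1 - s) (some repl) ++ res.drop (e + 1))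

def smooth_regimes_py_alt (regimes : List (Option String)) (min_bars : Int) : List (Option String) :=
  if regimes = [] ∨ min_bars ≤ 1 then regimes
  else absorbB min_bars 50 (pass1B regimes min_bars)

-- ===== PRECONDITION & SPEC =====
def Spec_smooth_regimes_py (regimes : List (Option String)) (min_bars : Int) (out : List (Option String)) : Prop := out = smooth_regimes_py_alt regimes min_bars
instance (regimes : List (Option String)) (min_bars : Int) (out : List (Option String)) : Decidable (Spec_smooth_regimes_py regimes min_bars out) := by unfold Spec_smooth_regimes_py; infer_instance

-- ===== CLAIM (what is proved, stated in full; the proofs are below) =====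
def Claim_equal_smooth_regimes_py : Prop := ∀ (regimes : List (Option String)) (min_bars : Int), Dom_smooth_regimes_py regimes min_bars → Spec_smooth_regimes_py regimes min_bars (smooth_regimes_py regimes min_bars)

-- ===== LEMMAS AND PROOFS =====

------------------------------------------------------------------- pass 1

-- what pass 1 writes at index i (proof-side description of one fold step)
def gA (res : List (Option String)) (w i : Nat) : Option String :=
  match res.getD i none with
  | none => res.getD i none
  | some _ =>
    match voteA res w i with
    | none => res.getD i none
    | some k => some k

theorem map_getD_range' (res : List (Option String)) (lo m : Nat) (h : lo + m ≤ res.length) :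
    (List.range' lo m).map (fun j => res.getD j none) = (res.drop lo).take m := by
  induction m generalizing lo with
  | zero => simp
  | succ m ih =>
    have hlo : lo < res.length := by omega
    rw [List.range'_succ, List.map_cons, ih (lo + 1) (by omega),
      List.drop_eq_getElem_cons hlo, List.take_succ_cons]
    simp [List.getD_eq_getElem?_getD, List.getElem?_eq_getElem hlo]

theorem winCounts_counter (res : List (Option String)) (lo hi : Nat)
    (hlo : lo ≤ res.length) (h : hi ≤ res.length) :
    winCounts res lo hi
      = PySem.Dict.counter (((res.drop lo).take (hi - lo)).filterMap id) := by
  rw [← PySem.Dict.foldl_insert_getD_add_one_eq_counter, List.foldl_filterMap,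
    ← map_getD_range' res lo (hi - lo) (by omega), List.foldl_map]
  unfold winCounts
  apply List.foldl_ext
  intro d j _
  cases res.getD j none <;> rfl

theorem pyMaxKey?_counter (ws : List String) :
    pyMaxKey? (PySem.Dict.counter ws)
      = PySem.List.max? (PySem.List.dedup ws) (fun r => (ws.count r : Int)) := by
  unfold pyMaxKey?
  rw [PySem.Dict.keys_counter, PySem.List.dedup_eq_ofList]
  congr 1
  funext k
  exact PySem.Dict.getD_counter ws k

theorem voteA_eq (res : List (Option String)) (w i : Nat) (hilen : i < res.length) :
    voteA res w i
      = voteB ((res.drop (i - w)).take (min res.length (i + w + 1) - (i - w))) := by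
  unfold voteA voteB
  rw [winCounts_counter res (i - w) (min res.length (i + w + 1)) (by omega) (by omega),
    pyMaxKey?_counter]

theorem mem_window (res : List (Option String)) (w i : Nat) (hilen : i < res.length) :
    res[i] ∈ (res.drop (i - w)).take (min res.length (i + w + 1) - (i - w)) := by
  have hq2 : i - (i - w) < (res.drop (i - w)).length := by
    simp [List.length_drop]; omega
  have : ((res.drop (i - w)).take (min res.length (i + w + 1) - (i - w)))[i - (i - w)]'(by
      simp [List.length_take, List.length_drop]; omega) = res[i] := by
    rw [List.getElem_take, List.getElem_drop]
    congr 1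
    omega
  rw [← this]
  exact List.getElem_mem _

theorem voteA_ne_none (res : List (Option String)) (w i : Nat) (hilen : i < res.length)
    (r : String) (hr : res[i] = some r) : voteA res w i ≠ none := by
  rw [voteA_eq res w i hilen]
  intro hcon
  unfold voteB at hcon
  rw [PySem.List.max?_eq_none_iff] at hcon
  have h1 : r ∈ ((res.drop (i - w)).take (min res.length (i + w + 1) - (i - w))).filterMap id :=
    List.mem_filterMap.2 ⟨some r, by rw [← hr]; exact mem_window res w i hilen, rfl⟩
  have h2 : r ∈ PySem.List.dedup
      (((res.drop (i - w)).take (min res.length (i + w + 1) - (i - w))).filterMap id) :=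
    (PySem.List.mem_dedup _ _).2 h1
  rw [hcon] at h2
  exact absurd h2 (List.not_mem_nil)

theorem foldA_eq (res : List (Option String)) (w : Nat) :
    ∀ k, k ≤ res.length →
    (List.range k).foldl
      (fun sm i => match res.getD i none with
        | none => sm
        | some _ =>
          match voteA res w i with
          | none => sm
          | some v => sm.set i (some v))
      res
    = (List.range k).map (gA res w) ++ res.drop k := by
  intro k
  induction k with
  | zero => simp
  | succ k ih =>
    intro hk
    have hklt : k < res.length := hk
    have hdrop : res.drop k = res[k] :: res.drop (k + 1) := List.drop_eq_getElem_cons hklt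
    have hgetD : res.getD k none = res[k] := by
      simp [List.getD_eq_getElem?_getD, List.getElem?_eq_getElem hklt]
    have hlen : ((List.range k).map (gA res w)).length = k := by simp
    rw [List.range_succ, List.foldl_append, List.foldl_cons, List.foldl_nil, ih (by omega),
      List.map_append, List.map_cons, List.map_nil]
    cases hrk : res[k] with
    | none =>
      simp only [hgetD, hrk, gA]
      rw [hdrop, hrk]
      simp
    | some r =>
      cases hv : voteA res w k with
      | none =>
        simp only [hgetD, hrk, hv, gA]
        rw [hdrop, hrk]
        simp
      | some v =>
        simp only [hgetD, hrk, hv, gA]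
        rw [List.set_append_right _ _ (by omega), hlen, Nat.sub_self, hdrop,
          List.set_cons_zero]
        simp

theorem pass1A_map (res : List (Option String)) (w : Nat) :
    pass1A res w = (List.range res.length).map (gA res w) := by
  unfold pass1A
  rw [foldA_eq res w res.length le_rfl]
  simp

theorem pass1_eq (res : List (Option String)) (mb : Int) (hmb : 2 ≤ mb) :
    pass1A res mb.toNat = pass1B res mb := by
  rw [pass1A_map]
  apply List.ext_getElem
  · simp [pass1B, PySem.List.length_enumerate]
  intro j h1 h2
  have hj : j < res.length := by simpa using h1
  rw [List.getElem_map, List.getElem_range]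
  unfold pass1B
  rw [List.getElem_map, PySem.List.getElem_enumerate]
  cases hrj : res[j] with
  | none =>
    simp only [gA]
    simp [List.getElem?_eq_getElem hj, hrj]
  | some r =>
    have hgd : res.getD j none = some r := by
      simp [List.getD_eq_getElem?_getD, List.getElem?_eq_getElem hj, hrj]
    have hw : (mb.toNat : Int) = mb := Int.toNat_of_nonneg (by omega)
    have hlo : max 0 ((0 : Int) + (j : Int) - mb) = ((j - mb.toNat : Nat) : Int) := by
      rcases le_or_gt mb (j : Int) with h | h
      · rw [max_eq_right (by omega)]
        omega
      · rw [max_eq_left (by omega)]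
        have : j - mb.toNat = 0 := by omega
        rw [this]
        rfl
    have hhi : (0 : Int) + (j : Int) + mb + 1 = ((j + mb.toNat + 1 : Nat) : Int) := by
      push_cast [hw]
      ring
    have hslice : PySem.List.slice res (some (max 0 ((0 : Int) + (j : Int) - mb)))
        (some ((0 : Int) + (j : Int) + mb + 1))
        = (res.drop (j - mb.toNat)).take
            (min res.length (j + mb.toNat + 1) - (j - mb.toNat)) := by
      rw [hlo, hhi, PySem.List.slice_natCast]
      by_cases hc : j + mb.toNat + 1 ≤ res.length
      · congr 1
        omega
      · rw [List.take_of_length_le (by simp [List.length_drop]; omega),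
          List.take_of_length_le (by simp [List.length_drop]; omega)]
    simp only [gA, hgd, hslice]
    cases hv : voteA res mb.toNat j with
    | none => exact absurd hv (voteA_ne_none res mb.toNat j hj r hrj)
    | some v => rw [← voteA_eq res mb.toNat j hj, hv]

------------------------------------------------------------------- pass 2: runs

theorem runsGo_nil (i : Nat) : runsGo i [] = [] := by
  rw [runsGo]

theorem runsGo_cons (i : Nat) (r : Option String) (rest : List (Option String)) :
    runsGo i (r :: rest)
      = (i, i + (rest.takeWhile (fun x => x == r)).length, r)
        :: runsGo (i + (rest.takeWhile (fun x => x == r)).length + 1)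
            (rest.drop ((rest.takeWhile (fun x => x == r)).length)) := by
  rw [runsGo]

theorem buildRuns_inv (res : List (Option String)) :
    ∀ (m i s : Nat) (acc : List (Nat × Nat × Option String)),
    s < i → i + m = res.length →
    res.drop s = List.replicate (i - s) (res.getD s none) ++ res.drop i →
    (let st := (List.range' i m).foldl
        (fun (st : List (Nat × Nat × Option String) × Nat) t =>
          if res.getD t none ≠ res.getD st.2 none then
            (st.1 ++ [(st.2, t - 1, res.getD st.2 none)], t)
          else st)
        (acc, s)
     st.1 ++ [(st.2, res.length - 1, res.getD st.2 none)])
    = acc ++ runsGo s (res.drop s) := by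
  intro m
  induction m with
  | zero =>
    intro i s acc hsi him hconst
    have hin : i = res.length := by omega
    have hdn : res.drop i = [] := by rw [hin, List.drop_length]
    rw [hdn, List.append_nil] at hconst
    simp only [List.range'_zero, List.foldl_nil]
    rw [hconst]
    have hrep : List.replicate (i - s) (res.getD s none)
        = res.getD s none :: List.replicate (i - s - 1) (res.getD s none) := by
      rw [← List.replicate_succ]
      congr 1
      omega
    rw [hrep, runsGo_cons, List.takeWhile_replicate]
    simp only [beq_self_eq_true, if_true, List.length_replicate, List.drop_replicate,
      Nat.sub_self, List.replicate_zero, runsGo_nil]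
    have hend : s + (i - s - 1) = res.length - 1 := by omega
    simp [hend]
  | succ m ih =>
    intro i s acc hsi him hconst
    have hilt : i < res.length := by omega
    have hdropi : res.drop i = res[i] :: res.drop (i + 1) := List.drop_eq_getElem_cons hilt
    have hgdi : res.getD i none = res[i] := by
      simp [List.getD_eq_getElem?_getD, List.getElem?_eq_getElem hilt]
    rw [List.range'_succ, List.foldl_cons]
    by_cases heq : res.getD i none = res.getD s none
    · rw [if_neg (fun hc => hc heq)]
      apply ih (i + 1) s acc (by omega) (by omega)
      have hri : res[i] = res.getD s none := by rw [← hgdi, heq]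
      rw [hdropi] at hconst
      rw [hconst, hri,
        show res.getD s none :: res.drop (i + 1) = [res.getD s none] ++ res.drop (i + 1) from rfl,
        ← List.append_assoc, ← List.replicate_succ']
      congr 2
      omega
    · rw [if_pos heq]
      have hnext : res.drop i
          = List.replicate (i + 1 - i) (res.getD i none) ++ res.drop (i + 1) := by
        rw [hdropi, hgdi]
        simp
      have hih := ih (i + 1) i (acc ++ [(s, i - 1, res.getD s none)]) (by omega) (by omega) hnext
      rw [hih, List.append_assoc]
      congr 1
      -- runsGo s (res.drop s) = (s, i - 1, res.getD s none) :: runsGo i (res.drop i)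
      have hrep : List.replicate (i - s) (res.getD s none)
          = res.getD s none :: List.replicate (i - s - 1) (res.getD s none) := by
        rw [← List.replicate_succ]
        congr 1
        omega
      have htw : List.takeWhile (fun x => x == res.getD s none)
          (List.replicate (i - s - 1) (res.getD s none) ++ res.drop i)
          = List.replicate (i - s - 1) (res.getD s none)
            ++ List.takeWhile (fun x => x == res.getD s none) (res.drop i) := by
        apply List.takeWhile_append_of_pos
        intro x hx
        rw [List.eq_of_mem_replicate hx]
        simp
      have htw2 : List.takeWhile (fun x => x == res.getD s none) (res.drop i) = [] := by
        rw [hgdi] at heq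
        rw [hdropi, List.takeWhile_cons, if_neg (by simp only [beq_iff_eq]; exact heq)]
      have htwlen : (List.takeWhile (fun x => x == res.getD s none)
          (List.replicate (i - s - 1) (res.getD s none) ++ res.drop i)).length = i - s - 1 := by
        rw [htw, htw2]
        simp
      have hrep2 : List.replicate (i - s) (res.getD s none) ++ res.drop i
          = res.getD s none :: (List.replicate (i - s - 1) (res.getD s none) ++ res.drop i) := by
        rw [hrep]
        rfl
      rw [hconst, hrep2, runsGo_cons, htwlen]
      have hd : List.drop (i - s - 1)
          (List.replicate (i - s - 1) (res.getD s none) ++ res.drop i) = res.drop i := by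
        rw [List.drop_append_of_le_length (by simp)]
        simp
      rw [hd]
      have h1 : s + (i - s - 1) = i - 1 := by omega
      rw [h1, show i - 1 + 1 = i from by omega]
      simp

theorem buildRuns_eq (res : List (Option String)) (h : res ≠ []) :
    buildRuns res res.length = runsGo 0 res := by
  have hn : 0 < res.length := List.length_pos_iff.2 h
  have h0 : res.drop 0 = List.replicate (1 - 0) (res.getD 0 none) ++ res.drop 1 := by
    have hd : res.drop 0 = res[0] :: res.drop 1 := List.drop_eq_getElem_cons hn
    have hg : res.getD 0 none = res[0] := by
      simp [List.getD_eq_getElem?_getD, List.getElem?_eq_getElem hn]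
    rw [hd, hg]
    simp
  have hinv := buildRuns_inv res (res.length - 1) 1 0 [] (by omega) (by omega) h0
  unfold buildRuns
  rw [hinv]
  simp

------------------------------------------------------------------- pass 2: scan

theorem absorbGo_eq (minb : Int) :
    ∀ (rest prevRev : List (Nat × Nat × Option String)),
    absorbGo minb prevRev rest = scanB minb (findNbr prevRev) rest := by
  intro rest
  induction rest with
  | nil => intro prevRev; rfl
  | cons t rest ih =>
    intro prevRev
    obtain ⟨s, e, r⟩ := t
    cases r with
    | none =>
      have hpush : findNbr ((s, e, none) :: prevRev) = findNbr prevRev := by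
        simp [findNbr]
      calc absorbGo minb prevRev ((s, e, none) :: rest)
          = absorbGo minb ((s, e, none) :: prevRev) rest := rfl
        _ = scanB minb (findNbr ((s, e, none) :: prevRev)) rest := ih _
        _ = scanB minb (findNbr prevRev) rest := by rw [hpush]
        _ = scanB minb (findNbr prevRev) ((s, e, none) :: rest) := rfl
    | some rr =>
      have hpush : findNbr ((s, e, some rr) :: prevRev) = some (rr, e - s + 1) := by
        simp [findNbr]
      have hna : nbrAfter rest = findNbr rest := rfl
      by_cases hshort : ((e - s + 1 : Nat) : Int) < minb
      · cases hp : findNbr prevRev with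
        | none =>
          cases hn : findNbr rest with
          | none =>
            simp only [absorbGo, scanB, hp, hn, hna, hshort, if_true, pickRepl]
            rw [ih, hpush]
          | some q =>
            obtain ⟨nr, nl⟩ := q
            simp only [absorbGo, scanB, hp, hn, hna, hshort, if_true, pickRepl]
        | some q =>
          obtain ⟨pr, pl⟩ := q
          cases hn : findNbr rest with
          | none =>
            simp only [absorbGo, scanB, hp, hn, hna, hshort, if_true, pickRepl]
          | some q2 =>
            obtain ⟨nr, nl⟩ := q2
            simp only [absorbGo, scanB, hp, hn, hna, hshort, if_true, pickRepl]
      · simp only [absorbGo, scanB, hshort, if_false]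
        rw [ih, hpush]

------------------------------------------------------------------- pass 2: write-back and bounds

theorem setRange_splice (v : Option String) :
    ∀ (m s : Nat) (res : List (Option String)), s + m ≤ res.length →
    (List.range' s m).foldl (fun r k => r.set k v) res
      = res.take s ++ List.replicate m v ++ res.drop (s + m) := by
  intro m
  induction m with
  | zero =>
    intro s res h
    simp
  | succ m ih =>
    intro s res h
    have hs : s < res.length := by omega
    rw [List.range'_succ, List.foldl_cons, ih (s + 1) (res.set s v) (by simp; omega)]
    have hlt : s < s + 1 + m := by omega
    rw [List.take_set, List.drop_set_of_lt hlt]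
    have htake : (res.take (s + 1)).set s v = res.take s ++ [v] := by
      rw [List.take_add_one, List.getElem?_eq_getElem hs]
      rw [List.set_append_right _ _ (by simp only [List.length_take]; omega)]
      simp [List.length_take, Nat.min_eq_left hs.le]
    rw [htake]
    have hsm : s + 1 + m = s + (m + 1) := by omega
    rw [hsm, List.replicate_succ]
    simp

theorem runsGo_bounds :
    ∀ (n : Nat) (l : List (Option String)), l.length ≤ n →
    ∀ (i s e : Nat) (r : Option String),
    (s, e, r) ∈ runsGo i l → i ≤ s ∧ s ≤ e ∧ e < i + l.length := by
  intro n
  induction n with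
  | zero =>
    intro l hl i s e r hmem
    have : l = [] := List.length_eq_zero_iff.mp (by omega)
    subst this
    simp [runsGo_nil] at hmem
  | succ n ihn =>
    intro l hl i s e r hmem
    cases l with
    | nil => simp [runsGo_nil] at hmem
    | cons r0 rest =>
      rw [runsGo_cons] at hmem
      have hk : (rest.takeWhile (fun x => x == r0)).length ≤ rest.length :=
        (List.takeWhile_sublist _).length_le
      rcases List.mem_cons.1 hmem with h | h
      · simp only [Prod.mk.injEq] at h
        obtain ⟨h1, h2, _⟩ := h
        subst h1
        subst h2
        simp
        omega
      · have hlen : (rest.drop ((rest.takeWhile (fun x => x == r0)).length)).length ≤ n := by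
          simp [List.length_drop]
          simp at hl
          omega
        have := ihn _ hlen _ s e r h
        simp [List.length_drop] at this ⊢
        omega

theorem scanB_mem (minb : Int) :
    ∀ (runs : List (Nat × Nat × Option String)) (before : Option (String × Nat))
      (s e : Nat) (rr : String),
    scanB minb before runs = some (s, e, rr) → ∃ r, (s, e, r) ∈ runs := by
  intro runs
  induction runs with
  | nil =>
    intro before s e rr h
    simp [scanB] at h
  | cons t rest ih =>
    intro before s e rr h
    obtain ⟨s0, e0, r0⟩ := t
    cases r0 with
    | none =>
      obtain ⟨r, hr⟩ := ih before s e rr h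
      exact ⟨r, List.mem_cons_of_mem _ hr⟩
    | some rr0 =>
      by_cases hshort : ((e0 - s0 + 1 : Nat) : Int) < minb
      · simp only [scanB, hshort, if_true] at h
        cases hpick : pickRepl before (nbrAfter rest) with
        | none =>
          rw [hpick] at h
          obtain ⟨r, hr⟩ := ih _ s e rr h
          exact ⟨r, List.mem_cons_of_mem _ hr⟩
        | some repl =>
          rw [hpick] at h
          simp at h
          exact ⟨some rr0, by simp [h.1, h.2.1]⟩
      · simp only [scanB, hshort, if_false] at h
        obtain ⟨r, hr⟩ := ih _ s e rr h
        exact ⟨r, List.mem_cons_of_mem _ hr⟩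

------------------------------------------------------------------- pass 2: the fuel loop

theorem pass2_eq (minb : Int) :
    ∀ (fuel : Nat) (res : List (Option String)), res ≠ [] →
    pass2 minb res.length fuel res = absorbB minb fuel res := by
  intro fuel
  induction fuel with
  | zero => intro res h; rfl
  | succ fuel ih =>
    intro res hne
    have hfind0 : findNbr ([] : List (Nat × Nat × Option String)) = none := rfl
    show (match absorbGo minb [] (buildRuns res res.length) with
      | none => res
      | some (s, e, repl) => pass2 minb res.length fuel (setRange res s e (some repl)))
      = (match scanB minb none (runsGo 0 res) with
      | none => res
      | some (s, e, repl) =>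
        absorbB minb fuel (res.take s ++ List.replicate (e + 1 - s) (some repl) ++ res.drop (e + 1)))
    rw [buildRuns_eq res hne, absorbGo_eq minb _ [], hfind0]
    cases hscan : scanB minb none (runsGo 0 res) with
    | none => rfl
    | some t =>
      obtain ⟨s, e, repl⟩ := t
      obtain ⟨r, hmem⟩ := scanB_mem minb _ none s e repl hscan
      have hb := runsGo_bounds res.length res le_rfl 0 s e r hmem
      have hse : s ≤ e := hb.2.1
      have hen : e < res.length := by
        have := hb.2.2
        omega
      have hsr : setRange res s e (some repl)
          = res.take s ++ List.replicate (e + 1 - s) (some repl) ++ res.drop (e + 1) := by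
        unfold setRange
        rw [setRange_splice (some repl) (e + 1 - s) s res (by omega)]
        congr 2
        omega
      have hlen : (res.take s ++ List.replicate (e + 1 - s) (some repl) ++ res.drop (e + 1)).length
          = res.length := by
        simp [List.length_take, List.length_drop]
        omega
      simp only []
      rw [hsr, show res.length
          = (res.take s ++ List.replicate (e + 1 - s) (some repl) ++ res.drop (e + 1)).length
          from hlen.symm]
      apply ih
      intro hcon
      have hc := congrArg List.length hcon
      rw [hlen] at hc
      exact hne (List.length_eq_zero_iff.mp (by simpa using hc))

theorem length_pass1B (res : List (Option String)) (mb : Int) :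
    (pass1B res mb).length = res.length := by
  simp [pass1B, PySem.List.length_enumerate]

-- ===== VERDICT (by name: the statement is the Claim_ definition above) =====
theorem smooth_regimes_py_spec : Claim_equal_smooth_regimes_py := by
  intro regimes min_bars _
  unfold Spec_smooth_regimes_py smooth_regimes_py smooth_regimes_py_alt
  split_ifs with h
  · rfl
  · rw [not_or] at h
    obtain ⟨hne, hmb⟩ := h
    rw [pass1_eq regimes min_bars (by omega)]
    have hP : pass1B regimes min_bars ≠ [] := by
      intro hcon
      have hc := congrArg List.length hcon
      rw [length_pass1B] at hc
      exact hne (List.length_eq_zero_iff.mp (by simpa using hc))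
    have hfin := pass2_eq min_bars 50 (pass1B regimes min_bars) hP
    rw [length_pass1B] at hfin
    exact hfin
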